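-- pv_equiv track=rewrite | github.com/wbelka/llm_instaler | core/dependencies.py | combine_dependencies
-- ===== SOURCE A (Python) =====
-- from typing import List, Dict
--
-- def combine_dependencies(base: List[str], additional: List[str]) -> List[str]:
--     """Combine dependency lists, avoiding duplicates.
--
--     Args:
--         base: Base dependency list
--         additional: Additional dependencies to add
--
--     Returns:
--         Combined list with no duplicates, preserving order
--     """
--     seen = {}
--     result = []
--
--     # Process all dependencies
--     for dep in base + additional:
--         pkg_name = dep.split('>=')[0].split('==')[0].split('<')[0].split('>')[0]
--
--         if pkg_name not in seen:
--             seen[pkg_name] = dep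
--             result.append(dep)
--         else:
--             # If we see the same package again, keep the one with higher version requirement
--             existing = seen[pkg_name]
--             if '>' in dep and '>' in existing:
--                 # Simple comparison - in production, use packaging.version
--                 if dep > existing:
--                     result[result.index(existing)] = dep
--                     seen[pkg_name] = dep
--
--     return result
-- ===== SOURCE B (Python) =====
-- def combine_dependencies(base, additional):
--     """Combine dependency lists, dedupe by package, keep higher '>' requirement.
--
--     Two staged passes instead of A's online update loop: first group all
--     dependency strings by package name (insertion order), then map each group
--     to its winner by a closed form: if the group's first spec has no '>' it
--     wins outright (no later spec can ever replace it); otherwise the winner is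
--     simply the lexicographic max of the group's '>'-containing specs.
--     """
--     groups = {}
--     for dep in base + additional:
--         name = dep.split('>=')[0].split('==')[0].split('<')[0].split('>')[0]
--         groups.setdefault(name, []).append(dep)
--     out = []
--     for ds in groups.values():
--         if '>' in ds[0]:
--             out.append(max(d for d in ds if '>' in d))
--         else:
--             out.append(ds[0])
--     return out
-- ===== Notes on version B (the rewrite author's own statement) =====
-- stated objective: alternative
-- what changed: B replaces A's single online update loop (dict of chosen deps + result list patched via list.index) by two staged passes: first group all deps by package name, then map each group to its winner by a closed form (first element if it has no '>', otherwise the lexicographic max of the group's '>'-containing elements).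
import Mathlib
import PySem

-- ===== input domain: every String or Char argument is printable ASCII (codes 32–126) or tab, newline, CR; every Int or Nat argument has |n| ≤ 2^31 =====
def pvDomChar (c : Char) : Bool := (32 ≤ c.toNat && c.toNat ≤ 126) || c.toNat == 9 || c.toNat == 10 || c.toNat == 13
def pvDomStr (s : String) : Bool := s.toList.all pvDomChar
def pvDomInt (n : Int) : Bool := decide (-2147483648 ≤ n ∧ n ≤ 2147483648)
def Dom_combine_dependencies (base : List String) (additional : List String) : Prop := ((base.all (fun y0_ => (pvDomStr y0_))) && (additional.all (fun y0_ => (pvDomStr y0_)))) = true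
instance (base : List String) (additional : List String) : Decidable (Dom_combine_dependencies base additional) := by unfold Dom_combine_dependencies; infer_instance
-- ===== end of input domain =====

-- B replaces A's online update loop by two staged passes (group by package
-- name, then map each group to its winner by a closed form); objective: alternative.


-- ===== PORT A =====
-- dep.split('>=')[0].split('==')[0].split('<')[0].split('>')[0]; str.split on a
-- nonempty separator never returns an empty list, so [0] (= headD "") is exact.
-- Both Pythons compute the package name by this very expression, so both ports share it.
def pkgOf (dep : String) : String :=
  ((PySem.Str.split?
    (((PySem.Str.split?
      (((PySem.Str.split?
        (((PySem.Str.split? dep ">=").getD []).headD "")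
        "==").getD []).headD "")
      "<").getD []).headD "")
    ">").getD []).headD ""

-- the body of A's for-loop over `base + additional`; state = (seen, result)
def stepA (st : PySem.Dict String String × List String) (dep : String) :
    PySem.Dict String String × List String :=
  let pkg_name := pkgOf dep
  if st.1.contains pkg_name = false then
    (st.1.insert pkg_name dep, st.2 ++ [dep])
  else
    -- existing = seen[pkg_name]; the key is present, so getD "" is exact
    let existing := (st.1.get? pkg_name).getD ""
    if PySem.Str.isIn ">" dep && PySem.Str.isIn ">" existing then
      if decide (existing < dep) then
        -- result[result.index(existing)] = dep; existing is always in result,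
        -- so the `none` arm is unreachable (Python would raise ValueError there)
        (st.1.insert pkg_name dep,
         match PySem.List.index? st.2 existing with
         | some i => st.2.set i dep
         | none => st.2)
      else st
    else st

def combine_dependencies (base : List String) (additional : List String) : List String :=
  ((base ++ additional).foldl stepA (PySem.Dict.empty, [])).2

-- ===== PORT B =====
-- pass 1: groups.setdefault(name, []).append(dep) = modify with default []
def stepG (g : PySem.Dict String (List String)) (dep : String) :
    PySem.Dict String (List String) :=
  g.modify (pkgOf dep) [] (· ++ [dep])

-- pass 2 body: ds[0] is headD "" (every group is nonempty); Python's
-- max(generator) is PySem.List.max? of the filtered list; the generator is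
-- never empty when this branch runs (ds[0] itself contains '>'), so getD "" is exact
def winner (ds : List String) : String :=
  if PySem.Str.isIn ">" (ds.headD "") then
    (PySem.List.max? (ds.filter (fun d => PySem.Str.isIn ">" d)) (fun y => y)).getD ""
  else ds.headD ""

def combine_dependencies_alt (base : List String) (additional : List String) : List String :=
  (((base ++ additional).foldl stepG PySem.Dict.empty).values).map winner

-- ===== PRECONDITION & SPEC =====
def Spec_combine_dependencies (base : List String) (additional : List String) (out : List String) : Prop := out = combine_dependencies_alt base additional
instance (base : List String) (additional : List String) (out : List String) : Decidable (Spec_combine_dependencies base additional out) := by unfold Spec_combine_dependencies; infer_instance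

-- ===== CLAIM (what is proved, stated in full; the proofs are below) =====
def Claim_equal_combine_dependencies : Prop := ∀ (base : List String) (additional : List String), Dom_combine_dependencies base additional → Spec_combine_dependencies base additional (combine_dependencies base additional)

-- ===== LEMMAS AND PROOFS =====

-- proof-side intermediate program: the dict of currently chosen deps, as A maintains it
def stepB (seen : PySem.Dict String String) (dep : String) : PySem.Dict String String :=
  let pkg := pkgOf dep
  match seen.get? pkg with
  | none => seen.insert pkg dep
  | some existing =>
      if PySem.Str.isIn ">" dep && PySem.Str.isIn ">" existing && decide (existing < dep)
      then seen.insert pkg dep else seen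

-- A's online replacement rule, and the running winner of a group
def upd (cur d : String) : String :=
  if PySem.Str.isIn ">" d && PySem.Str.isIn ">" cur && decide (cur < d) then d else cur

def runWin (ds : List String) : String := ds.tail.foldl upd (ds.headD "")

-- ---------- stage 1: A's fold equals the stepB fold's values (dict invariant) ----------

def DInv (d : PySem.Dict String String) : Prop :=
  (d.items.map (·.1)).Nodup ∧ ∀ q ∈ d.items, pkgOf q.2 = q.1

lemma keys_overwrite {ν : Type} (p : String) (v : ν) (its : List (String × ν)) :
    (its.map (fun q => if q.1 == p then (p, v) else q)).map (·.1) = its.map (·.1) := by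
  induction its with
  | nil => rfl
  | cons q rest ih =>
    simp only [List.map_cons, ih]
    by_cases h : q.1 = p <;> simp [h]

lemma find_set_values (p dep : String) (its : List (String × String))
    (hnd : (its.map (·.1)).Nodup) (hpk : ∀ q ∈ its, pkgOf q.2 = q.1)
    (pr : String × String) (hf : its.find? (fun q => q.1 == p) = some pr) :
    (match PySem.List.index? (its.map (·.2)) pr.2 with
      | some i => (its.map (·.2)).set i dep
      | none => its.map (·.2))
    = (its.map (fun q => if q.1 == p then (p, dep) else q)).map (·.2) := by
  induction its with
  | nil => simp at hf
  | cons q rest ih =>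
    by_cases hk : q.1 = p
    · simp only [List.find?_cons, hk, BEq.rfl] at hf
      injection hf with hf
      subst hf
      have hnd' := List.nodup_cons.mp (show (q.1 :: rest.map (·.1)).Nodup by simpa using hnd)
      have hrest : ∀ r ∈ rest, (r.1 == p) = false := by
        intro r hr
        by_cases h : r.1 = p
        · exact absurd (by rw [hk, ← h]; exact List.mem_map_of_mem hr) hnd'.1
        · simp [h]
      have hmap : rest.map (fun r => if r.1 == p then (p, dep) else r) = rest := by
        rw [List.map_congr_left (g := fun r => r) (fun r hr => by simp [hrest r hr]),
          List.map_id']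
      rw [List.map_cons, PySem.List.index?_cons_self, List.map_cons, hmap]
      simp [hk]
    · have hbe : (q.1 == p) = false := by simp [hk]
      simp only [List.find?_cons, hbe] at hf
      have hprm := List.mem_of_find?_eq_some hf
      have hpr1 : pr.1 = p := by have := List.find?_some hf; simpa using this
      have hne : q.2 ≠ pr.2 := by
        intro h
        have h1 : pkgOf q.2 = q.1 := hpk q (List.mem_cons_self ..)
        have h2 : pkgOf pr.2 = pr.1 := hpk pr (List.mem_cons_of_mem _ hprm)
        apply hk; rw [← h1, h, h2, hpr1]
      have hnd' := List.nodup_cons.mp (show (q.1 :: rest.map (·.1)).Nodup by simpa using hnd)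
      have ihr := ih hnd'.2 (fun r hr => hpk r (List.mem_cons_of_mem _ hr)) hf
      rw [List.map_cons, PySem.List.index?_cons_of_ne _ hne]
      cases hidx : PySem.List.index? (rest.map (·.2)) pr.2 with
      | none =>
        rw [hidx] at ihr
        simp only [Option.map_none]
        rw [List.map_cons, List.map_cons, if_neg (by simp [hbe]), ← ihr]
      | some j =>
        rw [hidx] at ihr
        simp only [Option.map_some]
        rw [List.map_cons, List.map_cons, if_neg (by simp [hbe]), ← ihr]
        rfl

lemma step_eq (d : PySem.Dict String String) (h : DInv d) (dep : String) :
    stepA (d, d.values) dep = (stepB d dep, (stepB d dep).values) ∧ DInv (stepB d dep) := by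
  obtain ⟨hnd, hpk⟩ := h
  cases hf : d.items.find? (fun q => q.1 == pkgOf dep) with
  | none =>
    have hc : d.contains (pkgOf dep) = false := by
      simp only [PySem.Dict.contains]
      rw [List.any_eq_false]
      intro q hq
      exact List.find?_eq_none.mp hf q hq
    have hg : d.get? (pkgOf dep) = none := by
      simp [PySem.Dict.get?, hf]
    have hins : (d.insert (pkgOf dep) dep).items = d.items ++ [(pkgOf dep, dep)] := by
      simp [PySem.Dict.insert, hc]
    constructor
    · simp only [stepA, stepB, hc, hg, if_true]
      refine Prod.ext rfl ?_
      simp [PySem.Dict.values, hins]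
    · simp only [stepB, hg]
      refine ⟨?_, ?_⟩
      · rw [hins]
        simp only [List.map_append, List.map_cons, List.map_nil]
        rw [List.nodup_append]
        refine ⟨hnd, List.nodup_singleton _, ?_⟩
        intro x hx y hy
        obtain ⟨q, hq, hq1⟩ := List.mem_map.mp hx
        have hye : y = pkgOf dep := by simpa using hy
        intro hxy
        have := List.find?_eq_none.mp hf q hq
        simp [hq1, hxy, hye] at this
      · rw [hins]
        intro q hq
        rcases List.mem_append.mp hq with h1 | h2
        · exact hpk q h1
        · have hq2 : q = (pkgOf dep, dep) := by simpa using h2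
          rw [hq2]
  | some pr =>
    have hc : d.contains (pkgOf dep) = true := by
      simp only [PySem.Dict.contains, List.any_eq_true]
      exact ⟨pr, List.mem_of_find?_eq_some hf, by simpa using List.find?_some hf⟩
    have hg : d.get? (pkgOf dep) = some pr.2 := by
      simp [PySem.Dict.get?, hf]
    have hins : (d.insert (pkgOf dep) dep).items
        = d.items.map (fun q => if q.1 == pkgOf dep then (pkgOf dep, dep) else q) := by
      simp [PySem.Dict.insert, hc]
    have hinv' : DInv (d.insert (pkgOf dep) dep) := by
      refine ⟨?_, ?_⟩
      · rw [hins, keys_overwrite]; exact hnd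
      · rw [hins]
        intro q hq
        obtain ⟨r, hr, hrq⟩ := List.mem_map.mp hq
        by_cases hrp : r.1 = pkgOf dep
        · simp only [hrp, BEq.rfl, if_true] at hrq
          rw [← hrq]
        · simp only [show (r.1 == pkgOf dep) = false by simp [hrp], Bool.false_eq_true,
            if_false] at hrq
          subst hrq; exact hpk r hr
    by_cases hcond : (PySem.Str.isIn ">" dep && PySem.Str.isIn ">" pr.2
        && decide (pr.2 < dep)) = true
    · have h1 : (PySem.Str.isIn ">" dep && PySem.Str.isIn ">" pr.2) = true := by
        simp only [Bool.and_eq_true] at hcond ⊢; exact hcond.1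
      have h2 : decide (pr.2 < dep) = true := by
        simp only [Bool.and_eq_true] at hcond; exact hcond.2
      constructor
      · have hfs := find_set_values (pkgOf dep) dep d.items hnd hpk pr hf
        simp only [stepA, stepB, hc, hg, if_true, Option.getD_some, h1, h2,
          Bool.true_eq_false, if_false, Bool.and_self]
        refine Prod.ext rfl ?_
        simpa [PySem.Dict.values, hins] using hfs
      · simp only [stepB, hg, hcond, if_true]
        exact hinv'
    · have hAeq : stepA (d, d.values) dep = (d, d.values) := by
        simp only [stepA, hc, hg, Option.getD_some]
        rw [if_neg (by simp)]
        by_cases ha : (PySem.Str.isIn ">" dep && PySem.Str.isIn ">" pr.2) = true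
        · have hz : decide (pr.2 < dep) = false := by
            cases hdz : decide (pr.2 < dep)
            · rfl
            · exact absurd (by rw [Bool.and_eq_true]; exact ⟨ha, hdz⟩) hcond
          rw [if_pos ha, if_neg (by rw [hz]; exact Bool.false_ne_true)]
        · rw [if_neg ha]
      have hBeq : stepB d dep = d := by
        simp only [stepB, hg]
        rw [if_neg hcond]
      rw [hAeq, hBeq]
      exact ⟨rfl, hnd, hpk⟩

lemma foldl_eq (l : List String) (d : PySem.Dict String String) (h : DInv d) :
    (l.foldl stepA (d, d.values)).2 = (l.foldl stepB d).values := by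
  induction l generalizing d with
  | nil => rfl
  | cons dep rest ih =>
    obtain ⟨heq, hinv⟩ := step_eq d h dep
    simp only [List.foldl_cons, heq]
    exact ih (stepB d dep) hinv

-- ---------- stage 2: the stepB fold's values are the groups' running winners ----------

def GInv (dB : PySem.Dict String String) (dG : PySem.Dict String (List String)) : Prop :=
  dB.items = dG.items.map (fun p => (p.1, runWin p.2)) ∧
  (dG.items.map (·.1)).Nodup ∧ ∀ p ∈ dG.items, p.2 ≠ []

lemma find?_map_fst {ν μ : Type} (its : List (String × ν)) (g : ν → μ) (k : String) :
    (its.map (fun p => (p.1, g p.2))).find? (fun p => p.1 == k)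
    = (its.find? (fun p => p.1 == k)).map (fun p => (p.1, g p.2)) := by
  induction its with
  | nil => rfl
  | cons q rest ih => by_cases h : q.1 = k <;> simp [h, ih]

lemma get?_map_runWin (dB : PySem.Dict String String) (dG : PySem.Dict String (List String))
    (h : dB.items = dG.items.map (fun p => (p.1, runWin p.2))) (k : String) :
    dB.get? k = (dG.get? k).map runWin := by
  simp only [PySem.Dict.get?, h, find?_map_fst]
  cases dG.items.find? (fun p => p.1 == k) <;> rfl

lemma runWin_single (d : String) : runWin [d] = d := rfl

lemma runWin_append (h : String) (t : List String) (dep : String) :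
    runWin (h :: (t ++ [dep])) = upd (runWin (h :: t)) dep := by
  simp [runWin, List.foldl_append]

set_option maxHeartbeats 1000000 in
lemma ginv_step (dB : PySem.Dict String String) (dG : PySem.Dict String (List String))
    (h : GInv dB dG) (dep : String) : GInv (stepB dB dep) (stepG dG dep) := by
  obtain ⟨hit, hnd, hne⟩ := h
  have hget := get?_map_runWin dB dG hit (pkgOf dep)
  have hG : stepG dG dep = dG.insert (pkgOf dep) (dG.getD (pkgOf dep) [] ++ [dep]) := rfl
  cases hf : dG.get? (pkgOf dep) with
  | none =>
    have hgB : dB.get? (pkgOf dep) = none := by rw [hget, hf]; rfl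
    have hcB : dB.contains (pkgOf dep) = false := by
      rw [PySem.Dict.contains_eq_isSome_get?, hgB]; rfl
    have hcG : dG.contains (pkgOf dep) = false := by
      rw [PySem.Dict.contains_eq_isSome_get?, hf]; rfl
    have hGd : dG.getD (pkgOf dep) [] = [] := by simp [PySem.Dict.getD, hf]
    have hsB : stepB dB dep = dB.insert (pkgOf dep) dep := by
      simp only [stepB, hgB]
    have hiB : (stepB dB dep).items = dB.items ++ [(pkgOf dep, dep)] := by
      rw [hsB]; exact PySem.Dict.items_insert_of_not_contains dB dep hcB
    have hiG : (stepG dG dep).items = dG.items ++ [(pkgOf dep, [dep])] := by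
      rw [hG, hGd]
      exact PySem.Dict.items_insert_of_not_contains dG _ hcG
    have hnk : pkgOf dep ∉ dG.items.map (·.1) := by
      have := (PySem.Dict.get?_eq_none_iff_not_mem_keys dG (pkgOf dep)).mp hf
      simpa [PySem.Dict.keys] using this
    refine ⟨?_, ?_, ?_⟩
    · rw [hiB, hiG, hit]
      simp only [List.map_append, List.map_cons, List.map_nil, runWin_single]
    · rw [hiG]
      simp only [List.map_append, List.map_cons, List.map_nil]
      rw [List.nodup_append]
      refine ⟨hnd, List.nodup_singleton _, ?_⟩
      intro x hx y hy hxy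
      have hye : y = pkgOf dep := by simpa using hy
      rw [hxy, hye] at hx
      exact hnk hx
    · rw [hiG]
      intro p hp
      rcases List.mem_append.mp hp with h1 | h2
      · exact hne p h1
      · have : p = (pkgOf dep, [dep]) := by simpa using h2
        simp [this]
  | some ds =>
    have hgB : dB.get? (pkgOf dep) = some (runWin ds) := by rw [hget, hf]; rfl
    have hcB : dB.contains (pkgOf dep) = true := by
      rw [PySem.Dict.contains_eq_isSome_get?, hgB]; rfl
    have hcG : dG.contains (pkgOf dep) = true := by
      rw [PySem.Dict.contains_eq_isSome_get?, hf]; rfl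
    have hGd : dG.getD (pkgOf dep) [] = ds := by simp [PySem.Dict.getD, hf]
    obtain ⟨h0, t, rfl⟩ : ∃ h0 t, ds = h0 :: t := by
      have := hne (pkgOf dep, ds) (PySem.Dict.mem_items_of_get?_eq_some dG hf)
      cases ds with
      | nil => exact absurd rfl this
      | cons a b => exact ⟨a, b, rfl⟩
    have hiG : (stepG dG dep).items
        = dG.items.map (fun p => if p.1 == pkgOf dep then (pkgOf dep, (h0 :: t) ++ [dep]) else p) := by
      rw [hG, hGd]
      exact PySem.Dict.items_insert_of_contains dG _ hcG
    have huniq : ∀ p ∈ dG.items, p.1 = pkgOf dep → p.2 = h0 :: t := by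
      intro p hp hpk
      have := PySem.Dict.get?_of_mem_items dG (show (p.1, p.2) ∈ dG.items from hp)
        (by simpa [PySem.Dict.keys] using hnd)
      rw [hpk, hf] at this
      exact (Option.some.inj this).symm
    have hmapG : (stepG dG dep).items.map (fun p => (p.1, runWin p.2))
        = dG.items.map (fun p => if p.1 == pkgOf dep
            then (pkgOf dep, upd (runWin (h0 :: t)) dep) else (p.1, runWin p.2)) := by
      rw [hiG, List.map_map]
      refine List.map_congr_left ?_
      intro p hp
      by_cases hk : p.1 = pkgOf dep
      · simp [hk, runWin_append]
      · simp [hk]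
    have hndG : ((stepG dG dep).items.map (·.1)).Nodup := by
      rw [hiG, keys_overwrite]; exact hnd
    have hneG : ∀ p ∈ (stepG dG dep).items, p.2 ≠ [] := by
      rw [hiG]
      intro p hp
      obtain ⟨r, hr, hrq⟩ := List.mem_map.mp hp
      by_cases hk : r.1 = pkgOf dep
      · simp only [hk, BEq.rfl, if_true] at hrq
        simp [← hrq]
      · simp only [show (r.1 == pkgOf dep) = false by simp [hk], Bool.false_eq_true,
          if_false] at hrq
        subst hrq; exact hne r hr
    by_cases hcond : (PySem.Str.isIn ">" dep && PySem.Str.isIn ">" (runWin (h0 :: t))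
        && decide (runWin (h0 :: t) < dep)) = true
    · have hupd : upd (runWin (h0 :: t)) dep = dep := by
        unfold upd; rw [if_pos hcond]
      have hsB : stepB dB dep = dB.insert (pkgOf dep) dep := by
        simp only [stepB, hgB]
        rw [if_pos hcond]
      have hiB : (stepB dB dep).items
          = dB.items.map (fun q => if q.1 == pkgOf dep then (pkgOf dep, dep) else q) := by
        rw [hsB]; exact PySem.Dict.items_insert_of_contains dB dep hcB
      refine ⟨?_, hndG, hneG⟩
      rw [hiB, hit, hmapG, hupd, List.map_map]
      refine List.map_congr_left ?_
      intro p hp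
      by_cases hk : p.1 = pkgOf dep <;> simp [hk]
    · have hupd : upd (runWin (h0 :: t)) dep = runWin (h0 :: t) := by
        unfold upd; rw [if_neg hcond]
      have hB : stepB dB dep = dB := by
        simp only [stepB, hgB]
        rw [if_neg hcond]
      refine ⟨?_, hndG, hneG⟩
      rw [hB, hit, hmapG, hupd]
      refine (List.map_congr_left ?_).symm
      intro p hp
      by_cases hk : p.1 = pkgOf dep
      · simp [hk, huniq p hp hk]
      · simp [hk]

lemma foldl_ginv (l : List String) (dB : PySem.Dict String String)
    (dG : PySem.Dict String (List String)) (h : GInv dB dG) :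
    GInv (l.foldl stepB dB) (l.foldl stepG dG) := by
  induction l generalizing dB dG with
  | nil => exact h
  | cons dep rest ih => exact ih _ _ (ginv_step dB dG h dep)

-- ---------- stage 3: the running winner is B's closed form ----------

lemma foldl_upd_of_not_gt (h : String) (t : List String)
    (hh : PySem.Str.isIn ">" h = false) : t.foldl upd h = h := by
  induction t with
  | nil => rfl
  | cons d rest ih =>
    have hupd : upd h d = h := by unfold upd; rw [hh]; simp
    simp only [List.foldl_cons, hupd]
    exact ih

lemma foldl_upd_of_gt (h : String) (t : List String)
    (hh : PySem.Str.isIn ">" h = true) :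
    t.foldl upd h = (t.filter (fun d => PySem.Str.isIn ">" d)).foldl max h := by
  induction t generalizing h with
  | nil => rfl
  | cons d rest ih =>
    by_cases hd : PySem.Str.isIn ">" d = true
    · have hupd : upd h d = max h d := by
        unfold upd; rw [hd, hh]
        by_cases hlt : h < d
        · rw [if_pos (by simpa using hlt), max_eq_right hlt.le]
        · have hle : d ≤ h := not_lt.mp hlt
          rw [if_neg (by simpa using hlt)]
          rcases eq_or_lt_of_le hle with heq | hstrict
          · rw [heq, max_self]
          · rw [max_eq_left hle]
      have hmax : PySem.Str.isIn ">" (max h d) = true := by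
        rcases max_choice h d with hc | hc <;> rw [hc] <;> assumption
      simp only [List.foldl_cons, List.filter_cons, hd, if_true, hupd]
      exact ih (max h d) hmax
    · have hdf : PySem.Str.isIn ">" d = false := by
        cases hx : PySem.Str.isIn ">" d
        · rfl
        · exact absurd hx hd
      have hupd : upd h d = h := by unfold upd; rw [hdf]; simp
      simp only [List.foldl_cons, List.filter_cons, hdf, hupd]
      exact ih h hh

lemma runWin_eq_winner (ds : List String) (h : ds ≠ []) : runWin ds = winner ds := by
  obtain ⟨h0, t, rfl⟩ : ∃ h0 t, ds = h0 :: t := by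
    cases ds with
    | nil => exact absurd rfl h
    | cons a b => exact ⟨a, b, rfl⟩
  unfold runWin winner
  show t.foldl upd h0
      = if PySem.Str.isIn ">" h0 then
          (PySem.List.max? ((h0 :: t).filter (fun d => PySem.Str.isIn ">" d)) (fun y => y)).getD ""
        else h0
  by_cases hh : PySem.Str.isIn ">" h0 = true
  · rw [if_pos hh, List.filter_cons, if_pos hh, PySem.List.max?_id_cons, Option.getD_some]
    exact foldl_upd_of_gt h0 t hh
  · have hh' : PySem.Str.isIn ">" h0 = false := by
      cases hx : PySem.Str.isIn ">" h0
      · rfl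
      · exact absurd hx hh
    rw [if_neg (by rw [hh']; exact Bool.false_ne_true)]
    exact foldl_upd_of_not_gt h0 t hh'

-- ===== VERDICT (by name: the statement is the Claim_ definition above) =====
theorem combine_dependencies_spec : Claim_equal_combine_dependencies := by
  intro base additional _
  unfold Spec_combine_dependencies combine_dependencies combine_dependencies_alt
  have hstart : (PySem.Dict.empty : PySem.Dict String String).values = ([] : List String) := rfl
  rw [← hstart,
    foldl_eq (base ++ additional) PySem.Dict.empty
      ⟨List.nodup_nil, by intro q hq; simp [PySem.Dict.empty] at hq⟩]
  obtain ⟨hit, _, hne⟩ := foldl_ginv (base ++ additional) PySem.Dict.empty PySem.Dict.empty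
    ⟨rfl, List.nodup_nil, by intro p hp; simp [PySem.Dict.empty] at hp⟩
  rw [PySem.Dict.values, hit, List.map_map, PySem.Dict.values, List.map_map]
  refine List.map_congr_left ?_
  intro p hp
  exact runWin_eq_winner p.2 (hne p hp)
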